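-- pv_equiv track=rewrite | github.com/wade-code/python-misc | sar.py | sar32
-- ===== SOURCE A (Python) =====
-- def sar32(x, m):
--   if x & 0x80000000 != 0:
--     filler = 0
--     for i in range(m):
--       filler |= 1 << 31-i
--     x = (x >> m) | filler
--     return x
--   else:
--     return x >> m
-- ===== SOURCE B (Python) =====
-- def _shift_sticky(x, m):
--     # shift right one bit at a time, re-inserting the sign bit each step
--     if m <= 0:
--         return x
--     return _shift_sticky((x >> 1) | 0x80000000, m - 1)
--
-- def sar32(x, m):
--     if x & 0x80000000 != 0:
--         return _shift_sticky(x, m)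
--     else:
--         return x >> m
-- ===== Notes on version B (the rewrite author's own statement) =====
-- stated objective: alternative
-- what changed: Replaced A's build-a-filler-mask loop plus final OR with a recursive helper that shifts right one bit at a time and re-inserts the sign bit at each step (sticky arithmetic shift), so no mask is ever materialised.
import Mathlib
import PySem

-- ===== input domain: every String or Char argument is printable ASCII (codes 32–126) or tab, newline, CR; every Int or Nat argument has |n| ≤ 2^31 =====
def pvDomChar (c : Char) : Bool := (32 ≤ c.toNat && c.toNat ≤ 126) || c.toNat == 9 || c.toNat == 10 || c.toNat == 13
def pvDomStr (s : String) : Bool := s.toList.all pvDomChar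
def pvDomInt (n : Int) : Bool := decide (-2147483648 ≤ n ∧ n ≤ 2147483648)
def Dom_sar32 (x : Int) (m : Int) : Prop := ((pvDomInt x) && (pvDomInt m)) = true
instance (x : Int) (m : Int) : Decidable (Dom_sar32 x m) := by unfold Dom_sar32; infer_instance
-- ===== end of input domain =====

-- B replaces A's filler-mask construction with a recursive helper that shifts right one bit
-- at a time, re-inserting the sign bit at each step ("sticky" arithmetic shift); alternative
-- decomposition, same cost.

-- ===== PORT A =====
def sar32 (x : Int) (m : Int) : Int :=
  if PySem.Int.band x 0x80000000 ≠ 0 then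
    let filler := (PySem.List.pyRange 0 m 1).foldl
      (fun f i => PySem.Int.bor f (1 <<< (31 - i).toNat)) 0
    PySem.Int.bor (x >>> m.toNat) filler
  else
    x >>> m.toNat

-- ===== PORT B =====
-- _shift_sticky's recursion on the integer m, realised structurally: the `m <= 0` base case,
-- then m.toNat further recursive steps (each step is the Python step `(x >> 1) | 0x80000000`)
def shiftStickyGo (x : Int) : Nat → Int
  | 0 => x
  | k + 1 => shiftStickyGo (PySem.Int.bor (x >>> 1) 0x80000000) k

def shiftSticky (x : Int) (m : Int) : Int :=
  if m ≤ 0 then x else shiftStickyGo x m.toNat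

def sar32_alt (x : Int) (m : Int) : Int :=
  if PySem.Int.band x 0x80000000 ≠ 0 then
    shiftSticky x m
  else
    x >>> m.toNat

-- ===== PRECONDITION & SPEC =====
-- Pre_ excludes exactly the inputs where Python A raises ValueError: negative shift m < 0,
-- and (when bit 31 of x is set) m ≥ 33, where A's loop computes 1 << (31 - i) with i > 31.
def Pre_sar32 (x : Int) (m : Int) : Prop :=
  0 ≤ m ∧ (PySem.Int.band x 0x80000000 = 0 ∨ m ≤ 32)
instance (x : Int) (m : Int) : Decidable (Pre_sar32 x m) := by unfold Pre_sar32; infer_instance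
def pvWitness_sar32 : Int × Int := (-1, 3)

def Spec_sar32 (x : Int) (m : Int) (out : Int) : Prop := out = sar32_alt x m
instance (x : Int) (m : Int) (out : Int) : Decidable (Spec_sar32 x m out) := by unfold Spec_sar32; infer_instance

-- ===== CLAIM (what is proved, stated in full; the proofs are below) =====
def Claim_equal_sar32 : Prop := ∀ (x : Int) (m : Int), Dom_sar32 x m → Pre_sar32 x m → Spec_sar32 x m (sar32 x m)

-- ===== LEMMAS AND PROOFS =====

-- two Nat numbers with disjoint bit ranges AND to zero
theorem and_shiftLeft_eq_zero (a b k : Nat) (h : a < 2 ^ k) : a &&& (b <<< k) = 0 := by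
  apply Nat.eq_of_testBit_eq
  intro i
  simp only [Nat.testBit_and, Nat.testBit_shiftLeft, Nat.zero_testBit, Bool.and_eq_false_iff]
  by_cases hik : k ≤ i
  · left
    exact Nat.testBit_eq_false_of_lt (lt_of_lt_of_le h (Nat.pow_le_pow_right (by norm_num) hik))
  · right
    simp [hik]

theorem and_two_pow_31_eq_zero (a : Nat) (h : a < 2 ^ 31) : a &&& 2 ^ 31 = 0 := by
  have := and_shiftLeft_eq_zero a 1 31 h
  simpa [Nat.shiftLeft_eq] using this

-- ORing a nonnegative mask into a negative number whose complement is disjoint from it is a no-op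
theorem bor_negSucc_disjoint (a : Nat) (f : Nat) (h : a &&& f = 0) :
    PySem.Int.bor (Int.negSucc a) (f : Int) = Int.negSucc a := by
  simp [PySem.Int.bor, Int.negSucc_eq, h]
  omega

-- the sticky loop on a negative 32-bit value is a plain arithmetic shift
theorem sticky_neg (k : Nat) (y : Nat) (h : y < 2 ^ 31) :
    shiftStickyGo (Int.negSucc y) k = Int.negSucc (y >>> k) := by
  induction k generalizing y with
  | zero => rfl
  | succ k ih =>
    have hstep : Int.negSucc y >>> 1 = Int.negSucc (y >>> 1) := rfl
    have hlt : y >>> 1 < 2 ^ 31 := lt_of_le_of_lt (Nat.shiftRight_le y 1) h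
    have hz : (y >>> 1) &&& 2 ^ 31 = 0 := and_two_pow_31_eq_zero _ hlt
    have hbor : PySem.Int.bor (Int.negSucc y >>> 1) 0x80000000 = Int.negSucc (y >>> 1) := by
      rw [hstep]
      have := bor_negSucc_disjoint (y >>> 1) (2 ^ 31) hz
      norm_num at this ⊢
      exact this
    show shiftStickyGo (PySem.Int.bor (Int.negSucc y >>> 1) 0x80000000) k = _
    rw [hbor, ih _ hlt, Nat.add_comm k 1, Nat.shiftRight_add]

-- A's filler loop equals (the cast of) the closed-form top-m-bits Nat mask, for 0 ≤ m ≤ 32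
theorem filler_eq (m : Int) (h0 : 0 ≤ m) (h32 : m ≤ 32) :
    (PySem.List.pyRange 0 m 1).foldl (fun f i => PySem.Int.bor f (1 <<< (31 - i).toNat)) 0
      = ((((1 <<< m.toNat) - 1) <<< (32 - m.toNat) : Nat) : Int) := by
  interval_cases m <;> decide

-- ===== VERDICT (by name: the statement is the Claim_ definition above) =====
set_option maxRecDepth 4096 in
theorem sar32_spec : Claim_equal_sar32 := by
  intro x m hdom hpre
  unfold Spec_sar32 sar32 sar32_alt
  by_cases hb : PySem.Int.band x 0x80000000 = 0
  · simp [hb]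
  · have h32 : m ≤ 32 := hpre.2.resolve_left hb
    have h0 : 0 ≤ m := hpre.1
    have hdx : -2147483648 ≤ x ∧ x ≤ 2147483648 := by
      have := hdom
      unfold Dom_sar32 pvDomInt at this
      simp only [Bool.and_eq_true, decide_eq_true_eq] at this
      exact this.1
    simp only [hb, ne_eq, not_false_eq_true, if_pos]
    by_cases hx : 0 ≤ x
    · -- nonnegative x with bit 31 set and |x| ≤ 2^31 forces x = 2^31
      have hx31 : x = 2147483648 := by
        by_contra hne
        have hlt : x < 2147483648 := lt_of_le_of_ne hdx.2 hne
        have hxn : x.toNat < 2 ^ 31 := by omega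
        have hz : x.toNat &&& 2 ^ 31 = 0 := and_two_pow_31_eq_zero _ hxn
        apply hb
        rw [PySem.Int.band_of_nonneg hx (by norm_num)]
        have h2 : Int.toNat (2147483648 : Int) = 2 ^ 31 := by decide
        rw [h2, hz]
        rfl
      subst hx31
      interval_cases m <;> decide
    · -- negative x: A's OR with the filler is a no-op, B's sticky steps are plain shifts
      rw [not_le] at hx
      obtain ⟨y, hy⟩ := Int.eq_negSucc_of_lt_zero hx
      subst hy
      have hylt : y < 2 ^ 31 := by
        have := hdx.1
        rw [Int.negSucc_eq] at this
        omega
      have hdisj : (y >>> m.toNat) &&& (((1 <<< m.toNat) - 1) <<< (32 - m.toNat)) = 0 := by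
        apply and_shiftLeft_eq_zero
        have hm32 : m.toNat ≤ 32 := by omega
        calc y >>> m.toNat = y / 2 ^ m.toNat := Nat.shiftRight_eq_div_pow y m.toNat
          _ < 2 ^ (32 - m.toNat) := by
              rw [Nat.div_lt_iff_lt_mul (Nat.pow_pos (by norm_num))]
              have hsum : 32 - m.toNat + m.toNat = 32 := by omega
              calc y < 2 ^ 31 := hylt
                _ ≤ 2 ^ 32 := by norm_num
                _ = 2 ^ (32 - m.toNat + m.toNat) := by rw [hsum]
                _ = 2 ^ (32 - m.toNat) * 2 ^ m.toNat := Nat.pow_add 2 _ _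
      have hshr : Int.negSucc y >>> m.toNat = Int.negSucc (y >>> m.toNat) := rfl
      rw [filler_eq m h0 h32, hshr, bor_negSucc_disjoint _ _ hdisj]
      unfold shiftSticky
      by_cases hm0 : m ≤ 0
      · have : m = 0 := le_antisymm hm0 h0
        subst this
        simp
      · rw [if_neg hm0, sticky_neg m.toNat y hylt]
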